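-- pv_equiv track=rewrite | github.com/CrosswaveOmega/NikkiBot | cogs/ResearchAgent/tools.py | set_ranges_based_on_token_size
-- ===== SOURCE A (Python) =====
-- def set_ranges_based_on_token_size(tokens):
--     ranges_dict = {
--         250: ("4-7", "7-10", "3-4"),
--         500: ("5-8", "8-12", "4-5"),
--         1000: ("6-9", "9-14", "5-6"),
--     }
--     for size, ranges in sorted(ranges_dict.items()):
--         if tokens < size:
--             return ranges
--     return ("7-10", "8-16", "6-7")
-- ===== SOURCE B (Python) =====
-- import bisect
--
-- _THRESHOLDS = [250, 500, 1000]
-- _RESULTS = [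
--     ("4-7", "7-10", "3-4"),
--     ("5-8", "8-12", "4-5"),
--     ("6-9", "9-14", "5-6"),
--     ("7-10", "8-16", "6-7"),
-- ]
--
-- def set_ranges_based_on_token_size(tokens):
--     return _RESULTS[bisect.bisect_right(_THRESHOLDS, tokens)]
-- ===== Notes on version B (the rewrite author's own statement) =====
-- stated objective: idiomatic
-- what changed: Replaces the dict-build plus sorted linear scan with a binary search (bisect_right) into a static threshold list indexing a parallel result table.
import Mathlib
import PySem

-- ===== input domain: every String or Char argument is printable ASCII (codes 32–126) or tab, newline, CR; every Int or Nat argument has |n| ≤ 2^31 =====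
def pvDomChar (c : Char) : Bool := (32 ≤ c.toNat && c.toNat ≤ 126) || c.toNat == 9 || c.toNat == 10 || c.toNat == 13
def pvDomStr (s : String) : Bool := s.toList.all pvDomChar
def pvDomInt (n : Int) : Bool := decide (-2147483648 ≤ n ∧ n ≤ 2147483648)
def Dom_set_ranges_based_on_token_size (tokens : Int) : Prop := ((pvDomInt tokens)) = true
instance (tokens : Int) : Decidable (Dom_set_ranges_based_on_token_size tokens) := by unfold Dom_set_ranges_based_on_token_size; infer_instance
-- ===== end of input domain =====

-- B replaces A's per-call dict construction and sorted linear scan by a binary search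
-- (bisect_right) into a static threshold list indexing a parallel result table (idiomatic).

-- ===== PORT A =====
-- A's loop over sorted(ranges_dict.items()): first (size, ranges) with tokens < size.
def pvLoopA (tokens : Int) : List (Int × (String × String × String)) → String × String × String
  | [] => ("7-10", "8-16", "6-7")
  | (size, ranges) :: rest => if tokens < size then ranges else pvLoopA tokens rest

def set_ranges_based_on_token_size (tokens : Int) : String × String × String :=
  let ranges_dict : PySem.Dict Int (String × String × String) :=
    (PySem.Dict.empty.insert 250 ("4-7", "7-10", "3-4")).insert 500 ("5-8", "8-12", "4-5")
      |>.insert 1000 ("6-9", "9-14", "5-6")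
  pvLoopA tokens (PySem.List.sorted ranges_dict.items (fun p => p.1) false)

-- ===== PORT B =====
def pvThresholds : List Int := [250, 500, 1000]
def pvResults : List (String × String × String) :=
  [("4-7", "7-10", "3-4"), ("5-8", "8-12", "4-5"), ("6-9", "9-14", "5-6"), ("7-10", "8-16", "6-7")]

def set_ranges_based_on_token_size_alt (tokens : Int) : String × String × String :=
  (pvResults.getD (PySem.List.bisectRight pvThresholds tokens) ("", "", ""))

-- ===== PRECONDITION & SPEC =====
def Spec_set_ranges_based_on_token_size (tokens : Int) (out : String × String × String) : Prop := out = set_ranges_based_on_token_size_alt tokens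
instance (tokens : Int) (out : String × String × String) : Decidable (Spec_set_ranges_based_on_token_size tokens out) := by unfold Spec_set_ranges_based_on_token_size; infer_instance

-- ===== CLAIM (what is proved, stated in full; the proofs are below) =====
def Claim_equal_set_ranges_based_on_token_size : Prop := ∀ (tokens : Int), Dom_set_ranges_based_on_token_size tokens → Spec_set_ranges_based_on_token_size tokens (set_ranges_based_on_token_size tokens)

-- ===== LEMMAS AND PROOFS =====

-- ===== VERDICT (by name: the statement is the Claim_ definition above) =====
theorem set_ranges_based_on_token_size_spec : Claim_equal_set_ranges_based_on_token_size := by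
  intro tokens _
  unfold Spec_set_ranges_based_on_token_size set_ranges_based_on_token_size
    set_ranges_based_on_token_size_alt
  simp only [PySem.Dict.empty, PySem.Dict.insert, PySem.List.sorted,
    PySem.List.bisectRight, pvThresholds, pvResults]
  rcases lt_or_ge tokens 250 with h | h
  · simp [pvLoopA, PySem.List.bisectRightLoop, PySem.List.insertBy, h, (by omega : tokens < 500)]
  · rcases lt_or_ge tokens 500 with h2 | h2
    · simp [pvLoopA, PySem.List.bisectRightLoop, PySem.List.insertBy, h2, not_lt.mpr h]
    · rcases lt_or_ge tokens 1000 with h3 | h3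
      · simp [pvLoopA, PySem.List.bisectRightLoop, PySem.List.insertBy, h3, not_lt.mpr h,
          not_lt.mpr h2]
      · simp [pvLoopA, PySem.List.bisectRightLoop, PySem.List.insertBy, not_lt.mpr h,
          not_lt.mpr h2, not_lt.mpr h3]
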